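-- pv_equiv track=rewrite | github.com/NuageRoue/CUPGE1 | SR/finalProject/V1/morpion.py | a_gagne_diag1
-- ===== SOURCE A (Python) =====
-- def a_gagne_diag1(grille: list, joueur: int) -> bool:
--     """
--         fonction qui verifie sur la diagonale montante la victoire du joueur passe en entree, renvoyant True si il existe une combinaison sur la diagonale du numero du joueur dans le tableau
--     """
--     nb_col = len(grille[-1])
--     nb_lig = len(grille)
--     for i in range(nb_lig):
--         for j in range(nb_col):
--             if grille[i][j] == joueur: #meme principe, mais selon la diagonale montante
--                 looked_lig = i
--                 looked_col = j
--                 align = 0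
--                 while (looked_lig < nb_lig and looked_col < nb_col) and grille[looked_lig][looked_col] == joueur:
--                     align+=1
--                     looked_lig += 1
--                     looked_col += 1
--                 if align == 5:
--                     return True
--     return False
-- ===== SOURCE B (Python) =====
-- def a_gagne_diag1(grille: list, joueur: int) -> bool:
--     """Single-pass DP: run length of the (+1,+1) diagonal ending at each cell."""
--     nb_col = len(grille[-1])
--     prev = [0] * nb_col
--     for row in grille:
--         cur = [0] * nb_col
--         for j in range(nb_col):
--             if row[j] == joueur:
--                 cur[j] = (prev[j - 1] if j > 0 else 0) + 1
--                 if cur[j] >= 5: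
--                     return True
--         prev = cur
--     return False
-- ===== Notes on version B (the rewrite author's own statement) =====
-- stated objective: alternative
-- what changed: A walks the whole diagonal from every cell equal to joueur (nested scan plus an inner while); B does a single row-major dynamic-programming pass keeping, per column, the length of the diagonal run ending at the current cell, exiting as soon as a run reaches 5.
import Mathlib
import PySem

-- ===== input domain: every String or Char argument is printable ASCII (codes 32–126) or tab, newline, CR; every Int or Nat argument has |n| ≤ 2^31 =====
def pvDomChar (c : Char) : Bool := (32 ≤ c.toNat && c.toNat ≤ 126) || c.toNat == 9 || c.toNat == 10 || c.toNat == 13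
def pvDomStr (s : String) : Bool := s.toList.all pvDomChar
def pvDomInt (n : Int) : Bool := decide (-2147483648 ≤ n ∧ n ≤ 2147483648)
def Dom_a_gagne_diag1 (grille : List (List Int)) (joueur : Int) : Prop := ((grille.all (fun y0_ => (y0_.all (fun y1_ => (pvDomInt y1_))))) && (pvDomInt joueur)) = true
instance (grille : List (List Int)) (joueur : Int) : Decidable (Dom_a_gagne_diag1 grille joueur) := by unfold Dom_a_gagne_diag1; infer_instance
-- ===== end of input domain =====

-- B replaces A's per-cell diagonal walk by a single row-major DP pass tracking, per
-- column, the length of the diagonal run ending at the current cell (alternative algorithm).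

-- ===== PORT A =====
-- cell access grille[i][j]: under Pre_ both indices are in range, getD is exact there
def pvCell (grille : List (List Int)) (i j : Nat) : Int :=
  (grille.getD i []).getD j 0

-- the inner `while` loop of A: counts diagonal cells equal to joueur
def pvAlign (grille : List (List Int)) (joueur : Int) (nbLig nbCol li lj : Nat) : Nat :=
  if li < nbLig ∧ lj < nbCol ∧ pvCell grille li lj = joueur then
    pvAlign grille joueur nbLig nbCol (li + 1) (lj + 1) + 1
  else 0
termination_by nbLig - li

def a_gagne_diag1 (grille : List (List Int)) (joueur : Int) : Bool :=
  let nbCol := (grille.getLastD []).length   -- len(grille[-1]); grille ≠ [] under Pre_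
  let nbLig := grille.length
  (List.range nbLig).any fun i =>
    (List.range nbCol).any fun j =>
      pvCell grille i j == joueur && pvAlign grille joueur nbLig nbCol i j == 5

-- ===== PORT B =====
-- one row of the DP: cur[j] = prev[j-1] + 1 where the cell is joueur, else 0
def pvCurRow (joueur : Int) (row : List Int) (prev : List Nat) (nbCol : Nat) : List Nat :=
  (List.range nbCol).map fun j =>
    if row.getD j 0 == joueur then (if 0 < j then prev.getD (j - 1) 0 else 0) + 1 else 0

-- the row loop with early exit as soon as a run of length ≥ 5 appears
def pvRows (joueur : Int) (nbCol : Nat) : List (List Int) → List Nat → Bool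
  | [], _ => false
  | row :: rest, prev =>
    let cur := pvCurRow joueur row prev nbCol
    if cur.any (fun v => 5 ≤ v) then true else pvRows joueur nbCol rest cur

def a_gagne_diag1_alt (grille : List (List Int)) (joueur : Int) : Bool :=
  let nbCol := (grille.getLastD []).length
  pvRows joueur nbCol grille (List.replicate nbCol 0)

-- ===== PRECONDITION & SPEC =====
-- Pre_ excludes inputs where Python raises IndexError: the empty grid (grille[-1]),
-- and ragged grids with a row shorter than the last row (grille[i][j] can go out of
-- range); slightly narrower than exact, since A can return True before reaching a
-- short row while B scans every earlier row in full.
def Pre_a_gagne_diag1 (grille : List (List Int)) (joueur : Int) : Prop :=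
  grille ≠ [] ∧ ∀ row ∈ grille, (grille.getLastD []).length ≤ row.length
instance (grille : List (List Int)) (joueur : Int) : Decidable (Pre_a_gagne_diag1 grille joueur) := by
  unfold Pre_a_gagne_diag1; infer_instance

def pvWitness_a_gagne_diag1 : List (List Int) × Int := ([[1, 0], [0, 1]], 1)

def Spec_a_gagne_diag1 (grille : List (List Int)) (joueur : Int) (out : Bool) : Prop := out = a_gagne_diag1_alt grille joueur
instance (grille : List (List Int)) (joueur : Int) (out : Bool) : Decidable (Spec_a_gagne_diag1 grille joueur out) := by unfold Spec_a_gagne_diag1; infer_instance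

-- ===== CLAIM (what is proved, stated in full; the proofs are below) =====
def Claim_equal_a_gagne_diag1 : Prop := ∀ (grille : List (List Int)) (joueur : Int), Dom_a_gagne_diag1 grille joueur → Pre_a_gagne_diag1 grille joueur → Spec_a_gagne_diag1 grille joueur (a_gagne_diag1 grille joueur)

-- ===== LEMMAS AND PROOFS =====

-- DP run length of the rising(+1,+1) diagonal ending at (i, j) (proof-side model of B)
def pvDP (grille : List (List Int)) (joueur : Int) : Nat → Nat → Nat
  | 0, j => if pvCell grille 0 j = joueur then 1 else 0
  | i + 1, 0 => if pvCell grille (i + 1) 0 = joueur then 1 else 0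
  | i + 1, j + 1 =>
    if pvCell grille (i + 1) (j + 1) = joueur then pvDP grille joueur i j + 1 else 0

-- the common specification: five consecutive joueur cells on a rising diagonal
def pvFive (grille : List (List Int)) (joueur : Int) (R C : Nat) : Prop :=
  ∃ i j, i + 4 < R ∧ j + 4 < C ∧ ∀ k < 5, pvCell grille (i + k) (j + k) = joueur

lemma pvAlign_elem (g : List (List Int)) (p : Int) (R C : Nat) :
    ∀ (k i j : Nat), k < pvAlign g p R C i j →
      i + k < R ∧ j + k < C ∧ pvCell g (i + k) (j + k) = p := by
  intro k
  induction k with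
  | zero =>
    intro i j hk
    rw [pvAlign] at hk
    split at hk
    · next h => simpa using ⟨h.1, h.2.1, h.2.2⟩
    · omega
  | succ k ih =>
    intro i j hk
    rw [pvAlign] at hk
    split at hk
    · next h =>
      have := ih (i + 1) (j + 1) (by omega)
      constructor
      · omega
      constructor
      · omega
      · have e1 : i + 1 + k = i + (k + 1) := by omega
        have e2 : j + 1 + k = j + (k + 1) := by omega
        rw [e1, e2] at this
        exact this.2.2
    · omega

lemma pvAlign_shift (g : List (List Int)) (p : Int) (R C : Nat) :
    ∀ (k i j : Nat), k ≤ pvAlign g p R C i j →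
      pvAlign g p R C (i + k) (j + k) = pvAlign g p R C i j - k := by
  intro k
  induction k with
  | zero => intro i j _; simp
  | succ k ih =>
    intro i j hk
    have hg := pvAlign_elem g p R C 0 i j (by omega)
    simp only [Nat.add_zero] at hg
    have hstep : pvAlign g p R C i j = pvAlign g p R C (i + 1) (j + 1) + 1 := by
      rw [pvAlign]; rw [if_pos ⟨hg.1, hg.2.1, hg.2.2⟩]
    have := ih (i + 1) (j + 1) (by omega)
    have e1 : i + 1 + k = i + (k + 1) := by omega
    have e2 : j + 1 + k = j + (k + 1) := by omega
    rw [e1, e2] at this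
    omega

lemma pvAlign_ge (g : List (List Int)) (p : Int) (R C : Nat) :
    ∀ (m i j : Nat),
      (∀ k < m, i + k < R ∧ j + k < C ∧ pvCell g (i + k) (j + k) = p) →
      m ≤ pvAlign g p R C i j := by
  intro m
  induction m with
  | zero => intro i j _; omega
  | succ m ih =>
    intro i j h
    have h0 := h 0 (by omega)
    simp only [Nat.add_zero] at h0
    have hrec : m ≤ pvAlign g p R C (i + 1) (j + 1) := by
      apply ih
      intro k hk
      have := h (k + 1) (by omega)
      have e1 : i + (k + 1) = i + 1 + k := by omega
      have e2 : j + (k + 1) = j + 1 + k := by omega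
      rw [e1, e2] at this
      exact this
    rw [pvAlign, if_pos ⟨h0.1, h0.2.1, h0.2.2⟩]
    omega

lemma a_iff (g : List (List Int)) (p : Int) :
    a_gagne_diag1 g p = true ↔ pvFive g p g.length (g.getLastD []).length := by
  unfold a_gagne_diag1 pvFive
  simp only [List.any_eq_true, List.mem_range, Bool.and_eq_true, beq_iff_eq]
  constructor
  · rintro ⟨i, hi, j, hj, _, halign⟩
    have h5 : pvAlign g p g.length (g.getLastD []).length i j = 5 := by
      simpa using halign
    refine ⟨i, j, ?_, ?_, ?_⟩
    · exact (pvAlign_elem g p g.length (g.getLastD []).length 4 i j (by omega)).1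
    · exact (pvAlign_elem g p g.length (g.getLastD []).length 4 i j (by omega)).2.1
    · intro k hk
      exact (pvAlign_elem g p g.length (g.getLastD []).length k i j (by omega)).2.2
  · rintro ⟨i, j, hiR, hjC, hcells⟩
    have hge : 5 ≤ pvAlign g p g.length (g.getLastD []).length i j := by
      apply pvAlign_ge
      intro k hk
      exact ⟨by omega, by omega, hcells k hk⟩
    set n := pvAlign g p g.length (g.getLastD []).length i j with hn
    have helem := pvAlign_elem g p g.length (g.getLastD []).length (n - 5) i j (by omega)
    have hshift := pvAlign_shift g p g.length (g.getLastD []).length (n - 5) i j (by omega)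
    refine ⟨i + (n - 5), helem.1, j + (n - 5), helem.2.1, helem.2.2, ?_⟩
    rw [hshift]
    omega

lemma pvDP_pos (g : List (List Int)) (p : Int) (i j : Nat)
    (h : pvCell g i j = p) : 1 ≤ pvDP g p i j := by
  match i, j with
  | 0, j => simp [pvDP, h]
  | i + 1, 0 => simp [pvDP, h]
  | i + 1, j + 1 => simp [pvDP, h]

lemma pvDP_ge (g : List (List Int)) (p : Int) :
    ∀ (m i j : Nat), (∀ k ≤ m, pvCell g (i + k) (j + k) = p) →
      m + 1 ≤ pvDP g p (i + m) (j + m) := by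
  intro m
  induction m with
  | zero =>
    intro i j h
    have h0 := h 0 (by omega)
    simp only [Nat.add_zero] at h0 ⊢
    exact pvDP_pos g p i j h0
  | succ m ih =>
    intro i j h
    have hcell : pvCell g (i + m + 1) (j + m + 1) = p := by
      have := h (m + 1) (by omega)
      have e1 : i + (m + 1) = i + m + 1 := by omega
      have e2 : j + (m + 1) = j + m + 1 := by omega
      rwa [e1, e2] at this
    have e1 : i + (m + 1) = i + m + 1 := by omega
    have e2 : j + (m + 1) = j + m + 1 := by omega
    rw [e1, e2]
    have : pvDP g p (i + m + 1) (j + m + 1) = pvDP g p (i + m) (j + m) + 1 := by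
      simp [pvDP, hcell]
    rw [this]
    have := ih i j (fun k hk => h k (by omega))
    omega

lemma pvDP_elem (g : List (List Int)) (p : Int) :
    ∀ (k i j : Nat), k < pvDP g p i j →
      k ≤ i ∧ k ≤ j ∧ pvCell g (i - k) (j - k) = p := by
  intro k
  induction k with
  | zero =>
    intro i j hk
    refine ⟨by omega, by omega, ?_⟩
    simp only [Nat.sub_zero]
    by_contra hne
    match i, j with
    | 0, j => simp [pvDP, hne] at hk
    | i + 1, 0 => simp [pvDP, hne] at hk
    | i + 1, j + 1 => simp [pvDP, hne] at hk
  | succ k ih =>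
    intro i j hk
    match i, j with
    | 0, j => have : pvDP g p 0 j ≤ 1 := by unfold pvDP; split <;> omega
              omega
    | i + 1, 0 => have : pvDP g p (i + 1) 0 ≤ 1 := by unfold pvDP; split <;> omega
                  omega
    | i + 1, j + 1 =>
      have hcell : pvCell g (i + 1) (j + 1) = p := by
        by_contra hne; simp [pvDP, hne] at hk
      have hlt : k < pvDP g p i j := by
        have : pvDP g p (i + 1) (j + 1) = pvDP g p i j + 1 := by simp [pvDP, hcell]
        omega
      have := ih i j hlt
      refine ⟨by omega, by omega, ?_⟩
      have e1 : i + 1 - (k + 1) = i - k := by omega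
      have e2 : j + 1 - (k + 1) = j - k := by omega
      rw [e1, e2]
      exact this.2.2

-- the DP value used by pvRows at row n (row 0 sees the all-zero prev)
def pvPrevVal (g : List (List Int)) (p : Int) (n j : Nat) : Nat :=
  match n with
  | 0 => 0
  | n' + 1 => pvDP g p n' j

lemma getD_map_range (f : Nat → Nat) (C j : Nat) (hj : j < C) :
    ((List.range C).map f).getD j 0 = f j := by
  rw [List.getD_eq_getElem?_getD, List.getElem?_map, List.getElem?_range hj]
  rfl

lemma pvCurRow_eq (g : List (List Int)) (p : Int) (C n : Nat) :
    pvCurRow p (g.getD n []) ((List.range C).map (pvPrevVal g p n)) C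
      = (List.range C).map (pvDP g p n) := by
  unfold pvCurRow
  apply List.map_congr_left
  intro j hj
  rw [List.mem_range] at hj
  have hcell : (g.getD n []).getD j 0 = pvCell g n j := rfl
  rw [hcell]
  by_cases hc : pvCell g n j = p
  · simp only [hc, beq_self_eq_true, if_pos]
    match n, j with
    | 0, 0 => simp [pvDP, hc]
    | 0, j + 1 =>
      rw [if_pos (by omega)]
      have hz : ((List.range C).map (pvPrevVal g p 0)).getD (j + 1 - 1) 0 = 0 := by
        rw [List.getD_eq_getElem?_getD, List.getElem?_map]
        cases (List.range C)[j + 1 - 1]? <;> simp [pvPrevVal]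
      rw [hz]
      simp [pvDP, hc]
    | n + 1, 0 => simp [pvDP, hc]
    | n + 1, j + 1 =>
      rw [if_pos (by omega)]
      rw [getD_map_range _ C (j + 1 - 1) (by omega)]
      simp [pvDP, pvPrevVal, hc]
  · rw [if_neg (by simpa using hc)]
    match n, j with
    | 0, j => simp [pvDP, hc]
    | n + 1, 0 => simp [pvDP, hc]
    | n + 1, j + 1 => simp [pvDP, hc]

lemma pvRows_iff (g : List (List Int)) (p : Int) (C : Nat) :
    ∀ (rest : List (List Int)) (n : Nat), g.drop n = rest →
      (pvRows p C rest ((List.range C).map (pvPrevVal g p n)) = true ↔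
        ∃ i j, n ≤ i ∧ i < g.length ∧ j < C ∧ 5 ≤ pvDP g p i j) := by
  intro rest
  induction rest with
  | nil =>
    intro n hdrop
    have hlen : g.length ≤ n := by
      by_contra h
      have := List.drop_eq_nil_iff.mp hdrop
      omega
    simp only [pvRows]
    constructor
    · intro h; exact absurd h (by simp)
    · rintro ⟨i, j, h1, h2, _, _⟩; omega
  | cons row rest ih =>
    intro n hdrop
    have hn : n < g.length := by
      by_contra h
      rw [List.drop_eq_nil_of_le (by omega)] at hdrop
      exact absurd hdrop (by simp)
    have hrow : g.getD n [] = row := by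
      have h1 : (g.drop n).head? = some row := by rw [hdrop]; rfl
      rw [List.head?_drop] at h1
      rw [List.getD_eq_getElem?_getD, h1]
      rfl
    have hdrop' : g.drop (n + 1) = rest := by
      have : (g.drop n).tail = g.drop (n + 1) := by
        rw [List.tail_drop]
      rw [← this, hdrop]
      rfl
    simp only [pvRows]
    rw [← hrow, pvCurRow_eq g p C n]
    have hcurprev : (List.range C).map (pvDP g p n)
        = (List.range C).map (pvPrevVal g p (n + 1)) := by
      apply List.map_congr_left; intro j _; rfl
    by_cases hany : ((List.range C).map (pvDP g p n)).any (fun v => 5 ≤ v) = true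
    · rw [if_pos hany]
      simp only [List.any_eq_true, List.mem_map, List.mem_range] at hany
      obtain ⟨v, ⟨j, hj, hv⟩, h5⟩ := hany
      simp only [true_iff]
      have h5' : 5 ≤ v := by simpa using h5
      exact ⟨n, j, by omega, hn, hj, by omega⟩
    · rw [if_neg hany, hcurprev, ih (n + 1) hdrop']
      constructor
      · rintro ⟨i, j, h1, h2, h3, h4⟩; exact ⟨i, j, by omega, h2, h3, h4⟩
      · rintro ⟨i, j, h1, h2, h3, h4⟩
        refine ⟨i, j, ?_, h2, h3, h4⟩
        rcases Nat.eq_or_lt_of_le h1 with heq | hlt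
        · exfalso
          apply hany
          simp only [List.any_eq_true, List.mem_map, List.mem_range]
          exact ⟨pvDP g p i j, ⟨j, h3, by rw [heq]⟩, decide_eq_true h4⟩
        · omega

lemma b_iff (g : List (List Int)) (p : Int) :
    a_gagne_diag1_alt g p = true ↔
      ∃ i j, i < g.length ∧ j < (g.getLastD []).length ∧ 5 ≤ pvDP g p i j := by
  show pvRows p (g.getLastD []).length g
      (List.replicate (g.getLastD []).length 0) = true ↔ _
  have hrep : List.replicate (g.getLastD []).length (0 : Nat)
      = (List.range (g.getLastD []).length).map (pvPrevVal g p 0) := by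
    have : (List.range (g.getLastD []).length).map (pvPrevVal g p 0)
        = (List.range (g.getLastD []).length).map (fun _ => 0) := by
      apply List.map_congr_left; intro j _; rfl
    rw [this, List.map_const', List.length_range]
  rw [hrep, pvRows_iff g p (g.getLastD []).length g 0 (by simp)]
  constructor
  · rintro ⟨i, j, _, h2, h3, h4⟩; exact ⟨i, j, h2, h3, h4⟩
  · rintro ⟨i, j, h2, h3, h4⟩; exact ⟨i, j, by omega, h2, h3, h4⟩

lemma dp_iff_five (g : List (List Int)) (p : Int) :
    (∃ i j, i < g.length ∧ j < (g.getLastD []).length ∧ 5 ≤ pvDP g p i j)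
      ↔ pvFive g p g.length (g.getLastD []).length := by
  unfold pvFive
  constructor
  · rintro ⟨i, j, hi, hj, hdp⟩
    have h4 := pvDP_elem g p 4 i j (by omega)
    refine ⟨i - 4, j - 4, by omega, by omega, ?_⟩
    intro k hk
    have := pvDP_elem g p (4 - k) i j (by omega)
    have e1 : i - 4 + k = i - (4 - k) := by omega
    have e2 : j - 4 + k = j - (4 - k) := by omega
    rw [e1, e2]
    exact this.2.2
  · rintro ⟨i, j, hi, hj, hcells⟩
    refine ⟨i + 4, j + 4, hi, hj, ?_⟩
    exact pvDP_ge g p 4 i j (fun k hk => hcells k (by omega))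

-- ===== VERDICT (by name: the statement is the Claim_ definition above) =====
theorem a_gagne_diag1_spec : Claim_equal_a_gagne_diag1 := by
  intro grille joueur _ _
  unfold Spec_a_gagne_diag1
  rw [Bool.eq_iff_iff, a_iff, b_iff, dp_iff_five]
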